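-- pv_equiv track=rewrite | github.com/Selim-Reza01/scrapers | te-parts/TE_pdf_to_excel.py | normalize_multiline
-- ===== SOURCE A (Python) =====
-- def normalize_multiline(s: str) -> str:
--     lines = [ln.rstrip() for ln in s.replace("\r", "\n").splitlines()]
--     while lines and not lines[0].strip():
--         lines.pop(0)
--     while lines and not lines[-1].strip():
--         lines.pop()
--     out, empty = [], False
--     for ln in lines:
--         if ln.strip():
--             out.append(ln)
--             empty = False
--         else:
--             if not empty:
--                 out.append("")
--             empty = True
--     return "\n".join(out)
-- ===== SOURCE B (Python) =====
-- def normalize_multiline(s: str) -> str: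
--     lines = [ln.rstrip() for ln in s.replace("\r", "\n").splitlines()]
--     paragraphs, cur = [], []
--     for ln in lines:
--         if ln:
--             cur.append(ln)
--         elif cur:
--             paragraphs.append("\n".join(cur))
--             cur = []
--     if cur:
--         paragraphs.append("\n".join(cur))
--     return "\n\n".join(paragraphs)
-- ===== Notes on version B (the rewrite author's own statement) =====
-- stated objective: simpler
-- what changed: Replaces the two edge-trimming while-pop loops and the empty-flag state machine by grouping nonempty lines into paragraphs and joining the paragraphs with a double newline; trimming and collapsing fall out of the grouping.
import Mathlib
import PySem

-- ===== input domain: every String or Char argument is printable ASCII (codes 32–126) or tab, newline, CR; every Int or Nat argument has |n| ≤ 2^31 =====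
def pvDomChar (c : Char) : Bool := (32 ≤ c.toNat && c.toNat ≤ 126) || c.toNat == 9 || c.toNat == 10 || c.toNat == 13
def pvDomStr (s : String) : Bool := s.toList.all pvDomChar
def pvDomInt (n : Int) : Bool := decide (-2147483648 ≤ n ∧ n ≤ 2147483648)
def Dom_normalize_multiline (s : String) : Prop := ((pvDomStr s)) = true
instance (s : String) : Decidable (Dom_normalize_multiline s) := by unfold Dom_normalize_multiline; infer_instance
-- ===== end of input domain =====

-- B replaces A's two edge-trimming while-pop loops and the empty-flag state machine by grouping
-- nonempty lines into paragraphs and joining the paragraphs with "\n\n" (objective: simpler).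

-- ===== PORT A =====
-- while lines and not lines[0].strip(): lines.pop(0)
def pvDropLeadA : List String → List String
  | [] => []
  | ln :: rest => if PySem.Str.strip ln = "" then pvDropLeadA rest else ln :: rest

-- while lines and not lines[-1].strip(): lines.pop()
def pvDropTrailA (lines : List String) : List String :=
  match _h : lines.getLast? with
  | none => lines
  | some ln => if PySem.Str.strip ln = "" then pvDropTrailA lines.dropLast else lines
termination_by lines.length
decreasing_by
  have hne : lines ≠ [] := by intro e; subst e; simp at _h
  cases lines with
  | nil => exact absurd rfl hne
  | cons a t => simp

-- the loop body of A's collapse loop (state: out, empty)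
def pvStepA (st : List String × Bool) (ln : String) : List String × Bool :=
  if PySem.Str.strip ln ≠ "" then (st.1 ++ [ln], false)
  else if st.2 = false then (st.1 ++ [""], true) else (st.1, true)

def normalize_multiline (s : String) : String :=
  let lines := (PySem.Str.splitlines (PySem.Str.replace s "\r" "\n")).map (fun ln => PySem.Str.rstrip ln)
  let lines2 := pvDropTrailA (pvDropLeadA lines)
  PySem.Str.join "\n" (lines2.foldl pvStepA ([], false)).1

-- ===== PORT B =====
-- the loop body of B's grouping loop (state: paragraphs, cur)
def pvStepB (st : List String × List String) (ln : String) : List String × List String :=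
  if ln ≠ "" then (st.1, st.2 ++ [ln])
  else if st.2 ≠ [] then (st.1 ++ [PySem.Str.join "\n" st.2], [])
  else (st.1, [])

-- the final "if cur: paragraphs.append('\n'.join(cur))"
def pvFlushB (st : List String × List String) : List String :=
  if st.2 ≠ [] then st.1 ++ [PySem.Str.join "\n" st.2] else st.1

def normalize_multiline_alt (s : String) : String :=
  let lines := (PySem.Str.splitlines (PySem.Str.replace s "\r" "\n")).map (fun ln => PySem.Str.rstrip ln)
  PySem.Str.join "\n\n" (pvFlushB (lines.foldl pvStepB ([], [])))

-- ===== PRECONDITION & SPEC =====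
def Spec_normalize_multiline (s : String) (out : String) : Prop := out = normalize_multiline_alt s
instance (s : String) (out : String) : Decidable (Spec_normalize_multiline s out) := by unfold Spec_normalize_multiline; infer_instance

-- ===== CLAIM (what is proved, stated in full; the proofs are below) =====
def Claim_equal_normalize_multiline : Prop := ∀ (s : String), Dom_normalize_multiline s → Spec_normalize_multiline s (normalize_multiline s)

-- ===== LEMMAS AND PROOFS =====

-- A's collapse loop, as a recursion with the blank test "ln = ''" (valid on rstripped lines)
def pvCol : List String → Bool → List String
  | [], _ => []
  | ln :: r, e =>
    if ln ≠ "" then ln :: pvCol r false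
    else if e = false then "" :: pvCol r true else pvCol r true

-- B's paragraph grouping, as a recursion on (current group, remaining lines)
def pvPb : List String → List String → List String
  | cur, [] => if cur ≠ [] then [PySem.Str.join "\n" cur] else []
  | cur, ln :: r =>
    if ln ≠ "" then pvPb (cur ++ [ln]) r
    else if cur ≠ [] then PySem.Str.join "\n" cur :: pvPb [] r
    else pvPb [] r

-- eq-test variants of A's trimming loops
def pvDLE : List String → List String
  | [] => []
  | ln :: rest => if ln = "" then pvDLE rest else ln :: rest

def pvDTE (lines : List String) : List String :=
  match _h : lines.getLast? with
  | none => lines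
  | some ln => if ln = "" then pvDTE lines.dropLast else lines
termination_by lines.length
decreasing_by
  have hne : lines ≠ [] := by intro e; subst e; simp at _h
  cases lines with
  | nil => exact absurd rfl hne
  | cons a t => simp

def pvBlankOk (l : List String) : Prop := ∀ ln ∈ l, (PySem.Str.strip ln = "" ↔ ln = "")

-- ---- Chars-level facts about strip/rstrip ----

theorem pvDropWhile_idem (p : Char → Bool) (l : List Char) :
    List.dropWhile p (List.dropWhile p l) = List.dropWhile p l := by
  induction l with
  | nil => rfl
  | cons a t ih => by_cases h : p a <;> simp [h, ih]

theorem pvRstrip_nil_iff (cs : List Char) :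
    PySem.Chars.rstrip cs = [] ↔ ∀ c ∈ cs, PySem.Chars.isspace c := by
  simp [PySem.Chars.rstrip, List.dropWhile_eq_nil_iff]

theorem pvStrip_nil_iff (cs : List Char) :
    PySem.Chars.strip cs = [] ↔ ∀ c ∈ cs, PySem.Chars.isspace c := by
  rw [PySem.Chars.strip, pvRstrip_nil_iff]
  simp only [PySem.Chars.lstrip]
  constructor
  · intro h c hc
    have hc' : c ∈ List.takeWhile PySem.Chars.isspace cs ++ List.dropWhile PySem.Chars.isspace cs := by
      rw [List.takeWhile_append_dropWhile]; exact hc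
    rcases List.mem_append.mp hc' with h1 | h2
    · exact List.mem_takeWhile_imp h1
    · exact h c h2
  · intro h c hc
    exact h c ((List.dropWhile_sublist (p := PySem.Chars.isspace)).subset hc)

theorem pvRstrip_idem (cs : List Char) :
    PySem.Chars.rstrip (PySem.Chars.rstrip cs) = PySem.Chars.rstrip cs := by
  simp [PySem.Chars.rstrip, pvDropWhile_idem]

theorem pvBlank_iff (x : String) :
    PySem.Str.strip (PySem.Str.rstrip x) = "" ↔ PySem.Str.rstrip x = "" := by
  rw [← String.toList_inj, ← String.toList_inj]
  have h0 : ("" : String).toList = [] := rfl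
  rw [h0, PySem.Str.toList_strip, PySem.Str.toList_rstrip]
  rw [pvStrip_nil_iff]
  conv_rhs => rw [← pvRstrip_idem x.toList]
  rw [pvRstrip_nil_iff]

-- ---- blankOk plumbing ----

theorem pvBlankOk_sub {l m : List String} (h : m ⊆ l) (hp : pvBlankOk l) : pvBlankOk m :=
  fun ln hln => hp ln (h hln)

theorem pvBlankOk_lines (xs : List String) :
    pvBlankOk (xs.map (fun ln => PySem.Str.rstrip ln)) := by
  intro ln hln
  rcases List.mem_map.mp hln with ⟨x, _, rfl⟩
  exact pvBlank_iff x

theorem pvDLE_subset (l : List String) : pvDLE l ⊆ l := by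
  induction l with
  | nil => simp [pvDLE]
  | cons a t ih =>
    by_cases h : a = ""
    · simp only [pvDLE, if_pos h]
      exact ih.trans (List.subset_cons_self _ _)
    · simp [pvDLE, h]

theorem pvDTE_prefix : ∀ (n : Nat) (l : List String), l.length ≤ n → pvDTE l <+: l := by
  intro n
  induction n with
  | zero =>
    intro l hl
    have : l = [] := List.length_eq_zero_iff.mp (Nat.le_zero.mp hl)
    subst this; rw [pvDTE.eq_def]; simp
  | succ n ih =>
    intro l hl
    rw [pvDTE.eq_def]
    split
    · exact List.prefix_refl l
    · rename_i ln h
      have hne : l ≠ [] := by intro e; subst e; simp at h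
      have hd : l.dropLast.length = l.length - 1 := List.length_dropLast
      have hpos : 0 < l.length := List.length_pos_iff.mpr hne
      have hlen : l.dropLast.length ≤ n := by omega
      by_cases hb : ln = ""
      · rw [if_pos hb]
        exact (ih l.dropLast hlen).trans (List.dropLast_prefix l)
      · rw [if_neg hb]

-- ---- congruences: A's strip tests reduce to eq tests on rstripped lines ----

theorem pvDropLeadA_eq {l : List String} (hp : pvBlankOk l) : pvDropLeadA l = pvDLE l := by
  induction l with
  | nil => rfl
  | cons a t ih =>
    have ha := hp a (List.mem_cons_self)
    have ht : pvBlankOk t := pvBlankOk_sub (List.subset_cons_self a t) hp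
    by_cases h : a = ""
    · rw [pvDropLeadA, pvDLE, if_pos (ha.mpr h), if_pos h, ih ht]
    · have hs : ¬ PySem.Str.strip a = "" := fun hse => h (ha.mp hse)
      rw [pvDropLeadA, pvDLE, if_neg hs, if_neg h]

theorem pvDropTrailA_eq : ∀ (n : Nat) (l : List String), l.length ≤ n → pvBlankOk l →
    pvDropTrailA l = pvDTE l := by
  intro n
  induction n with
  | zero =>
    intro l hl _
    have : l = [] := List.length_eq_zero_iff.mp (Nat.le_zero.mp hl)
    subst this; rw [pvDropTrailA.eq_def, pvDTE.eq_def]; simp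
  | succ n ih =>
    intro l hl hp
    rw [pvDropTrailA.eq_def, pvDTE.eq_def]
    cases hgl : l.getLast? with
    | none => simp
    | some ln =>
      simp only
      have hmem : ln ∈ l := List.mem_of_getLast? hgl
      have hiff := hp ln hmem
      have hne : l ≠ [] := by intro e; subst e; simp at hgl
      have hd : l.dropLast.length = l.length - 1 := List.length_dropLast
      have hpos : 0 < l.length := List.length_pos_iff.mpr hne
      have hlen : l.dropLast.length ≤ n := by omega
      have hpdl : pvBlankOk l.dropLast :=
        pvBlankOk_sub ((List.dropLast_prefix l).subset) hp
      by_cases hb : ln = ""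
      · rw [if_pos (hiff.mpr hb), if_pos hb, ih l.dropLast hlen hpdl]
      · have hs : ¬ PySem.Str.strip ln = "" := fun hse => hb (hiff.mp hse)
        rw [if_neg hs, if_neg hb]

-- ---- pvPb absorbs trimming ----

theorem pvPb_append_blank : ∀ (l cur : List String), pvPb cur (l ++ [""]) = pvPb cur l := by
  intro l
  induction l with
  | nil =>
    intro cur
    by_cases h : cur = [] <;> simp [pvPb, h]
  | cons a t ih =>
    intro cur
    by_cases h : a = ""
    · subst h
      by_cases hc : cur = [] <;> simp [pvPb, hc, ih]
    · simp [pvPb, h, ih]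

theorem pvPb_pvDTE : ∀ (n : Nat) (l cur : List String), l.length ≤ n →
    pvPb cur (pvDTE l) = pvPb cur l := by
  intro n
  induction n with
  | zero =>
    intro l cur hl
    have : l = [] := List.length_eq_zero_iff.mp (Nat.le_zero.mp hl)
    subst this; rw [pvDTE.eq_def]; simp
  | succ n ih =>
    intro l cur hl
    rw [pvDTE.eq_def]
    cases hgl : l.getLast? with
    | none => simp
    | some ln =>
      simp only
      have hne : l ≠ [] := by intro e; subst e; simp at hgl
      have hd : l.dropLast.length = l.length - 1 := List.length_dropLast
      have hpos : 0 < l.length := List.length_pos_iff.mpr hne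
      have hlen : l.dropLast.length ≤ n := by omega
      by_cases hb : ln = ""
      · rw [if_pos hb, ih l.dropLast cur hlen]
        have hgl2 := List.getLast?_eq_some_getLast hne
        have hlast : l.getLast hne = ln := by
          rw [hgl2] at hgl; exact Option.some_inj.mp hgl
        conv_rhs => rw [← List.dropLast_concat_getLast hne, hlast, hb]
        exact (pvPb_append_blank l.dropLast cur).symm
      · rw [if_neg hb]

theorem pvPb_pvDLE (l : List String) : pvPb [] (pvDLE l) = pvPb [] l := by
  induction l with
  | nil => rfl
  | cons a t ih =>
    by_cases h : a = ""
    · simp [pvDLE, pvPb, h, ih]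
    · simp [pvDLE, h]

-- ---- pvCol and head/tail blank facts ----

theorem pvHbf_pvDLE (l : List String) : (pvDLE l).head? ≠ some "" := by
  induction l with
  | nil => simp [pvDLE]
  | cons a t ih =>
    by_cases h : a = ""
    · simp only [pvDLE, if_pos h]; exact ih
    · simp [pvDLE, h]

theorem pvHbf_prefix {m l : List String} (h : m <+: l) (hl : l.head? ≠ some "") :
    m.head? ≠ some "" := by
  cases m with
  | nil => simp
  | cons a t =>
    rcases h with ⟨r, hr⟩
    subst hr
    simpa using hl

theorem pvCol_false_true {l : List String} (h : l.head? ≠ some "") :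
    pvCol l false = pvCol l true := by
  cases l with
  | nil => rfl
  | cons a r =>
    have ha : a ≠ "" := by intro e; subst e; simp at h
    simp [pvCol, ha]

theorem pvNoTrail_pvDTE : ∀ (n : Nat) (l : List String), l.length ≤ n →
    (pvDTE l).getLast? ≠ some "" := by
  intro n
  induction n with
  | zero =>
    intro l hl
    have : l = [] := List.length_eq_zero_iff.mp (Nat.le_zero.mp hl)
    subst this; rw [pvDTE.eq_def]; simp
  | succ n ih =>
    intro l hl
    rw [pvDTE.eq_def]
    cases hgl : l.getLast? with
    | none => simp only; rw [hgl]; simp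
    | some ln =>
      simp only
      have hne : l ≠ [] := by intro e; subst e; simp at hgl
      have hd : l.dropLast.length = l.length - 1 := List.length_dropLast
      have hpos : 0 < l.length := List.length_pos_iff.mpr hne
      have hlen : l.dropLast.length ≤ n := by omega
      by_cases hb : ln = ""
      · rw [if_pos hb]; exact ih l.dropLast hlen
      · rw [if_neg hb, hgl]
        simp only [ne_eq, Option.some.injEq]
        exact hb

-- ---- nonemptiness ----

theorem pvCol_ne_nil : ∀ (l : List String) (e : Bool), (∃ x ∈ l, x ≠ "") → pvCol l e ≠ [] := by
  intro l
  induction l with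
  | nil => intro e h; rcases h with ⟨x, hx, _⟩; simp at hx
  | cons a r ih =>
    intro e h
    by_cases ha : a = ""
    · subst ha
      have hr : ∃ x ∈ r, x ≠ "" := by
        rcases h with ⟨x, hx, hne⟩
        rcases List.mem_cons.mp hx with rfl | hxr
        · exact absurd rfl hne
        · exact ⟨x, hxr, hne⟩
      cases e
      · simp [pvCol]
      · simpa [pvCol] using ih true hr
    · simp [pvCol, ha]

theorem pvPb_ne_nil : ∀ (l cur : List String), (cur ≠ [] ∨ ∃ x ∈ l, x ≠ "") → pvPb cur l ≠ [] := by
  intro l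
  induction l with
  | nil =>
    intro cur h
    rcases h with h | h
    · simp [pvPb, h]
    · rcases h with ⟨x, hx, _⟩; simp at hx
  | cons a r ih =>
    intro cur h
    by_cases ha : a = ""
    · subst ha
      have hr : cur ≠ [] ∨ ∃ x ∈ r, x ≠ "" := by
        rcases h with h | ⟨x, hx, hne⟩
        · exact Or.inl h
        · rcases List.mem_cons.mp hx with rfl | hxr
          · exact absurd rfl hne
          · exact Or.inr ⟨x, hxr, hne⟩
      by_cases hc : cur = []
      · subst hc
        rcases hr with h' | h'
        · exact absurd rfl h'
        · simpa [pvPb] using ih [] (Or.inr h')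
      · simp [pvPb, hc]
    · exact (by simpa [pvPb, ha] using ih (cur ++ [a]) (Or.inl (by simp)))

theorem pvExists_ne_of_last {l : List String} (hne : l ≠ []) (h : l.getLast? ≠ some "") :
    ∃ x ∈ l, x ≠ "" := by
  cases hgl : l.getLast? with
  | none => exact absurd (List.getLast?_eq_none_iff.mp hgl) hne
  | some x => exact ⟨x, List.mem_of_getLast? hgl, fun e => h (by rw [hgl, e])⟩

-- ---- String join lemmas ----

theorem pvSjoin_singleton (sep a : String) : PySem.Str.join sep [a] = a := by
  rw [← String.toList_inj]
  simp [PySem.Str.toList_join, PySem.Chars.join_singleton]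

theorem pvSjoin_cons (sep a : String) {l : List String} (h : l ≠ []) :
    PySem.Str.join sep (a :: l) = a ++ sep ++ PySem.Str.join sep l := by
  cases l with
  | nil => exact absurd rfl h
  | cons b t =>
    rw [← String.toList_inj]
    simp [PySem.Str.toList_join, String.toList_append, PySem.Chars.join_cons_cons]

theorem pvSjoin_append (sep : String) : ∀ (l1 l2 : List String), l1 ≠ [] → l2 ≠ [] →
    PySem.Str.join sep (l1 ++ l2) = PySem.Str.join sep l1 ++ sep ++ PySem.Str.join sep l2 := by
  intro l1
  induction l1 with
  | nil => intro l2 h1 _; exact absurd rfl h1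
  | cons a t ih =>
    intro l2 _ h2
    cases t with
    | nil =>
      rw [List.singleton_append, pvSjoin_cons sep a h2, pvSjoin_singleton]
    | cons b t2 =>
      have hbt : (b :: t2 : List String) ≠ [] := by simp
      have hbt2 : (b :: t2) ++ l2 ≠ [] := by simp
      rw [List.cons_append, pvSjoin_cons sep a hbt2, ih l2 hbt h2,
          pvSjoin_cons sep a hbt]
      simp [String.append_assoc]

-- ---- the main induction: collapsed-with-blanks vs paragraphs ----

theorem pvMG : ∀ (n : Nat) (l : List String), l.length ≤ n →
    ((l.getLast? ≠ some "" →
        PySem.Str.join "\n" (pvCol l true) = PySem.Str.join "\n\n" (pvPb [] l)) ∧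
     (∀ cur, cur ≠ [] → l.getLast? ≠ some "" →
        PySem.Str.join "\n" (cur ++ pvCol l false) = PySem.Str.join "\n\n" (pvPb cur l))) := by
  intro n
  induction n with
  | zero =>
    intro l hl
    have : l = [] := List.length_eq_zero_iff.mp (Nat.le_zero.mp hl)
    subst this
    constructor
    · intro _; rfl
    · intro cur hcur _
      simp [pvCol, pvPb, hcur, pvSjoin_singleton]
  | succ n ih =>
    intro l hl
    have hTail : ∀ (a : String) (r : List String), (a :: r).getLast? ≠ some "" → r ≠ [] →
        r.getLast? ≠ some "" := by
      intro a r h hne e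
      cases r with
      | nil => exact absurd rfl hne
      | cons b t => rw [List.getLast?_cons_cons] at h; exact h e
    constructor
    · -- whole-list statement
      cases l with
      | nil => intro _; rfl
      | cons a r =>
        intro hNT
        have hlr : r.length ≤ n := by simp at hl; omega
        by_cases ha : a = ""
        · subst ha
          have hrne : r ≠ [] := by
            intro e; subst e; simp at hNT
          have hNT' : r.getLast? ≠ some "" := hTail "" r hNT hrne
          have hcol : pvCol ("" :: r) true = pvCol r true := by simp [pvCol]
          have hpb : pvPb [] ("" :: r) = pvPb [] r := by simp [pvPb]
          rw [hcol, hpb]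
          exact (ih r hlr).1 hNT'
        · have hNT' : r.getLast? ≠ some "" := by
            cases r with
            | nil => simp
            | cons b t => exact hTail a (b :: t) hNT (by simp)
          have hcol : pvCol (a :: r) true = [a] ++ pvCol r false := by simp [pvCol, ha]
          have hpb : pvPb [] (a :: r) = pvPb [a] r := by simp [pvPb, ha]
          rw [hcol, hpb]
          exact (ih r hlr).2 [a] (by simp) hNT'
    · -- statement with a pending group
      cases l with
      | nil =>
        intro cur hcur _
        simp [pvCol, pvPb, hcur, pvSjoin_singleton]
      | cons a r =>
        intro cur hcur hNT
        have hlr : r.length ≤ n := by simp at hl; omega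
        by_cases ha : a = ""
        · subst ha
          have hrne : r ≠ [] := by intro e; subst e; simp at hNT
          have hNT' : r.getLast? ≠ some "" := hTail "" r hNT hrne
          have hex : ∃ x ∈ r, x ≠ "" := pvExists_ne_of_last hrne hNT'
          have hcolne : pvCol r true ≠ [] := pvCol_ne_nil r true hex
          have hpbne : pvPb [] r ≠ [] := pvPb_ne_nil r [] (Or.inr hex)
          have hcol : pvCol ("" :: r) false = "" :: pvCol r true := by simp [pvCol]
          have hpb : pvPb cur ("" :: r) = PySem.Str.join "\n" cur :: pvPb [] r := by
            simp [pvPb, hcur]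
          rw [hcol, hpb]
          rw [pvSjoin_append "\n" cur ("" :: pvCol r true) hcur (by simp)]
          rw [pvSjoin_cons "\n" "" hcolne]
          rw [pvSjoin_cons "\n\n" (PySem.Str.join "\n" cur) hpbne]
          rw [← (ih r hlr).1 hNT']
          rw [← String.toList_inj]
          have h1 : ("\n\n" : String).toList = ['\n', '\n'] := rfl
          have h2 : ("\n" : String).toList = ['\n'] := rfl
          simp [String.toList_append, h1, h2]
        · have hNT' : r.getLast? ≠ some "" := by
            cases r with
            | nil => simp
            | cons b t => exact hTail a (b :: t) hNT (by simp)
          have hcol : pvCol (a :: r) false = a :: pvCol r false := by simp [pvCol, ha]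
          have hpb : pvPb cur (a :: r) = pvPb (cur ++ [a]) r := by simp [pvPb, ha]
          rw [hcol, hpb]
          have hsplit : cur ++ a :: pvCol r false = (cur ++ [a]) ++ pvCol r false := by simp
          rw [hsplit]
          exact (ih r hlr).2 (cur ++ [a]) (by simp) hNT'

-- ---- the two folds compute pvCol / pvPb ----

theorem pvFoldA : ∀ (l : List String) (acc : List String) (e : Bool), pvBlankOk l →
    (l.foldl pvStepA (acc, e)).1 = acc ++ pvCol l e := by
  intro l
  induction l with
  | nil => intro acc e _; simp [pvCol]
  | cons a r ih =>
    intro acc e hp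
    have ha := hp a List.mem_cons_self
    have hr : pvBlankOk r := pvBlankOk_sub (List.subset_cons_self a r) hp
    by_cases h : a = ""
    · subst h
      have hs : PySem.Str.strip "" = "" := ha.mpr rfl
      cases e
      · have hstep : pvStepA (acc, false) "" = (acc ++ [""], true) := by
          simp [pvStepA, hs]
        rw [List.foldl_cons, hstep, ih (acc ++ [""]) true hr]
        simp [pvCol]
      · have hstep : pvStepA (acc, true) "" = (acc, true) := by
          simp [pvStepA, hs]
        rw [List.foldl_cons, hstep, ih acc true hr]
        simp [pvCol]
    · have hs : ¬ PySem.Str.strip a = "" := fun hse => h (ha.mp hse)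
      have hstep : pvStepA (acc, e) a = (acc ++ [a], false) := by
        simp [pvStepA, hs]
      rw [List.foldl_cons, hstep, ih (acc ++ [a]) false hr]
      simp [pvCol, h]

theorem pvFoldB : ∀ (l paras cur : List String),
    pvFlushB (l.foldl pvStepB (paras, cur)) = paras ++ pvPb cur l := by
  intro l
  induction l with
  | nil =>
    intro paras cur
    by_cases h : cur = [] <;> simp [pvFlushB, pvPb, h]
  | cons a r ih =>
    intro paras cur
    by_cases h : a = ""
    · subst h
      by_cases hc : cur = []
      · subst hc
        have hstep : pvStepB (paras, []) "" = (paras, []) := by simp [pvStepB]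
        rw [List.foldl_cons, hstep, ih paras []]
        simp [pvPb]
      · have hstep : pvStepB (paras, cur) "" = (paras ++ [PySem.Str.join "\n" cur], []) := by
          simp [pvStepB, hc]
        rw [List.foldl_cons, hstep, ih (paras ++ [PySem.Str.join "\n" cur]) []]
        simp [pvPb, hc]
    · have hstep : pvStepB (paras, cur) a = (paras, cur ++ [a]) := by simp [pvStepB, h]
      rw [List.foldl_cons, hstep, ih paras (cur ++ [a])]
      simp [pvPb, h]

-- ===== VERDICT (by name: the statement is the Claim_ definition above) =====
theorem normalize_multiline_spec : Claim_equal_normalize_multiline := by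
  intro s _
  simp only [Spec_normalize_multiline, normalize_multiline, normalize_multiline_alt]
  set L := (PySem.Str.splitlines (PySem.Str.replace s "\r" "\n")).map
      (fun ln => PySem.Str.rstrip ln) with hL
  have hpL : pvBlankOk L := pvBlankOk_lines _
  have hpDLE : pvBlankOk (pvDLE L) := pvBlankOk_sub (pvDLE_subset L) hpL
  have hpre : pvDTE (pvDLE L) <+: pvDLE L := pvDTE_prefix (pvDLE L).length _ le_rfl
  have hpM : pvBlankOk (pvDTE (pvDLE L)) := pvBlankOk_sub hpre.subset hpDLE
  rw [pvDropLeadA_eq hpL, pvDropTrailA_eq (pvDLE L).length _ le_rfl hpDLE]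
  rw [pvFoldA _ [] false hpM, List.nil_append]
  rw [pvFoldB L [] [], List.nil_append]
  rw [pvCol_false_true (pvHbf_prefix hpre (pvHbf_pvDLE L))]
  rw [(pvMG (pvDTE (pvDLE L)).length _ le_rfl).1
      (pvNoTrail_pvDTE (pvDLE L).length _ le_rfl)]
  rw [pvPb_pvDTE (pvDLE L).length _ _ le_rfl, pvPb_pvDLE]
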